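-- pv_equiv track=rewrite | github.com/MaxBuk2004/prg-basics | 04-Functions/7-17.py | f
-- ===== SOURCE A (Python) =====
-- def f(number):
--
--     str_number = str(number)
--     seen = []
--     sum_of_repeats = 0
--
--     i = 0
--     while i < len(str_number):
--         digit = str_number[i]
--         if digit in seen:
--             sum_of_repeats += int(digit)
--         else:
--             seen.append(digit)
--         i += 1
--
--     return sum_of_repeats
-- ===== SOURCE B (Python) =====
-- def f(number):
--     counts = {}
--     for ch in str(number):
--         counts[ch] = counts.get(ch, 0) + 1
--     total = 0
--     for ch, c in counts.items():
--         if c > 1: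
--             total += int(ch) * (c - 1)
--     return total
-- ===== Notes on version B (the rewrite author's own statement) =====
-- stated objective: idiomatic
-- what changed: Replaces the per-character membership scan over a growing 'seen' list by a frequency table built in one pass, then a single pass over the distinct characters accumulating int(ch)*(count-1) for counts > 1.
import Mathlib
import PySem

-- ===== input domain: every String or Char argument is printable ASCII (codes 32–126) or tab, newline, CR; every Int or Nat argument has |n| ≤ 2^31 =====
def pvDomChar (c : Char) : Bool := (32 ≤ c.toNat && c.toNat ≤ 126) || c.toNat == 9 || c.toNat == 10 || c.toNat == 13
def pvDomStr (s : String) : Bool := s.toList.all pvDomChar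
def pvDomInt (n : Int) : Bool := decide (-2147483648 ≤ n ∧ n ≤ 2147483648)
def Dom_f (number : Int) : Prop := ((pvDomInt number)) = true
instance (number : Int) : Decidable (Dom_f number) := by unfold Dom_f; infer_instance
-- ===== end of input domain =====

-- B replaces A's per-character membership scan over a growing 'seen' list by a
-- frequency table built in one pass, then one pass over the distinct characters.


-- ===== PORT A =====
-- int(digit): in both Pythons int() is only reached on a repeated char of str(int),
-- always a digit, so the ValueError default 0 is unreachable.
def pvVal (digit : Char) : Int := (PySem.Int.ofChars? [digit]).getD 0

def f (number : Int) : Int :=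
  let str_number := PySem.Int.toChars number
  let r := str_number.foldl
    (fun (st : List Char × Int) digit =>
      if digit ∈ st.1 then (st.1, st.2 + pvVal digit)
      else (st.1 ++ [digit], st.2))
    ([], 0)
  r.2

-- ===== PORT B =====
def f_alt (number : Int) : Int :=
  let counts := (PySem.Int.toChars number).foldl
    (fun (d : PySem.Dict Char Int) ch => d.insert ch (d.getD ch 0 + 1)) PySem.Dict.empty
  counts.items.foldl
    (fun (total : Int) p => if 1 < p.2 then total + pvVal p.1 * (p.2 - 1) else total) 0

-- ===== PRECONDITION & SPEC =====
def Spec_f (number : Int) (out : Int) : Prop := out = f_alt number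
instance (number : Int) (out : Int) : Decidable (Spec_f number out) := by unfold Spec_f; infer_instance

-- ===== CLAIM (what is proved, stated in full; the proofs are below) =====
def Claim_equal_f : Prop := ∀ (number : Int), Dom_f number → Spec_f number (f number)

-- ===== LEMMAS AND PROOFS =====

-- the common value both loops compute, as a sum over the distinct characters
def pvCommon (l : List Char) : Int :=
  ((PySem.Set.ofList l).map (fun k => pvVal k * ((l.count k : Int) - 1))).sum

-- dropping terms on which the guard fails changes nothing when those terms are 0
lemma pv_sum_filter_zero {α : Type} (p : α → Bool) (g : α → Int) :
    ∀ xs : List α, (∀ x ∈ xs, p x = false → g x = 0) →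
    ((xs.filter p).map g).sum = (xs.map g).sum := by
  intro xs
  induction xs with
  | nil => intro _; rfl
  | cons a t ih =>
    intro h
    by_cases ha : p a = true
    · simp [ha, ih (fun x hx => h x (List.mem_cons_of_mem _ hx))]
    · simp only [Bool.not_eq_true] at ha
      simp [ha, h a (List.mem_cons_self) ha,
        ih (fun x hx => h x (List.mem_cons_of_mem _ hx))]

-- bumping the summand at one element of a duplicate-free list bumps the sum
lemma pv_sum_map_upd {S : List Char} (hnd : S.Nodup) {c : Char} (hc : c ∈ S)
    (fo g : Char → Int) (v : Int)
    (hne : ∀ k ∈ S, k ≠ c → g k = fo k) (hcc : g c = fo c + v) :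
    (S.map g).sum = (S.map fo).sum + v := by
  induction S with
  | nil => cases hc
  | cons a t ih =>
    rcases List.mem_cons.mp hc with rfl | hct
    · have ht : ∀ k ∈ t, g k = fo k := by
        intro k hk
        exact hne k (List.mem_cons_of_mem _ hk)
          (fun hkc => (List.nodup_cons.mp hnd).1 (hkc ▸ hk))
      simp [hcc, List.map_congr_left ht]
      ring
    · have hac : a ≠ c := fun h => (List.nodup_cons.mp hnd).1 (h ▸ hct)
      have := ih (List.nodup_cons.mp hnd).2 hct
        (fun k hk hkc => hne k (List.mem_cons_of_mem _ hk) hkc)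
      simp [this, hne a (List.mem_cons_self) hac]
      ring

-- A's loop computes (set of chars seen, pvCommon)
lemma pv_A_loop (l : List Char) :
    l.foldl
      (fun (st : List Char × Int) digit =>
        if digit ∈ st.1 then (st.1, st.2 + pvVal digit)
        else (st.1 ++ [digit], st.2)) ([], 0)
    = (PySem.Set.ofList l, pvCommon l) := by
  induction l using List.reverseRecOn with
  | nil => simp [pvCommon, PySem.Set.ofList]
  | append_singleton l c ih =>
    have hset : PySem.Set.ofList (l ++ [c]) = PySem.Set.add (PySem.Set.ofList l) c := by
      rw [PySem.Set.ofList_eq_foldl, PySem.Set.ofList_eq_foldl, List.foldl_append]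
      rfl
    rw [List.foldl_append, ih]
    by_cases hc : c ∈ l
    · have hmem : c ∈ PySem.Set.ofList l := (PySem.Set.mem_ofList _ _).mpr hc
      have hadd : PySem.Set.add (PySem.Set.ofList l) c = PySem.Set.ofList l := by
        simp [PySem.Set.add, PySem.Set.contains, hmem]
      have hsum : pvCommon (l ++ [c]) = pvCommon l + pvVal c := by
        unfold pvCommon
        rw [hset, hadd]
        refine pv_sum_map_upd (PySem.Set.nodup_ofList l) hmem _ _ (pvVal c) ?_ ?_
        · intro k hk hkc
          have : (l ++ [c]).count k = l.count k := by
            simp [List.count_append, Ne.symm hkc]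
          rw [this]
        · have : (l ++ [c]).count c = l.count c + 1 := by
            simp [List.count_append]
          rw [this]
          push_cast
          ring
      simp [List.foldl_cons, List.foldl_nil, hmem, hset, hsum]
    · have hmem : c ∉ PySem.Set.ofList l := fun h => hc ((PySem.Set.mem_ofList _ _).mp h)
      have hadd : PySem.Set.add (PySem.Set.ofList l) c = PySem.Set.ofList l ++ [c] := by
        simp [PySem.Set.add, PySem.Set.contains, hmem]
      have hsum : pvCommon (l ++ [c]) = pvCommon l := by
        unfold pvCommon
        rw [hset, hadd, List.map_append, List.sum_append]
        have h1 : ∀ k ∈ PySem.Set.ofList l,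
            pvVal k * (((l ++ [c]).count k : Int) - 1)
              = pvVal k * ((l.count k : Int) - 1) := by
          intro k hk
          have hkc : c ≠ k := fun h => hc (h ▸ (PySem.Set.mem_ofList _ _).mp hk)
          simp [List.count_append, hkc]
        have h2 : (l ++ [c]).count c = 1 := by
          simp [List.count_append, List.count_eq_zero_of_not_mem hc]
        rw [List.map_congr_left h1]
        simp
        exact Or.inr (List.count_eq_zero_of_not_mem hc)
      simp [List.foldl_cons, List.foldl_nil, hmem, hset, hsum]

-- B's two passes compute pvCommon as well
lemma pv_B_eq (l : List Char) :
    ((l.foldl (fun (d : PySem.Dict Char Int) ch => d.insert ch (d.getD ch 0 + 1))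
        PySem.Dict.empty).items).foldl
      (fun (total : Int) p => if 1 < p.2 then total + pvVal p.1 * (p.2 - 1) else total) 0
    = pvCommon l := by
  rw [PySem.Dict.foldl_insert_getD_add_one_eq_counter, PySem.Dict.items_counter,
    PySem.List.foldl_ite_eq_foldl_filter, PySem.List.foldl_add, List.filter_map,
    List.map_map]
  have := pv_sum_filter_zero
    (fun k => decide (1 < ((l.count k : Int))))
    (fun k => pvVal k * ((l.count k : Int) - 1))
    (PySem.Set.ofList l)
    (by
      intro k hk hfalse
      have hmem : k ∈ l := (PySem.Set.mem_ofList _ _).mp hk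
      have h1 : 1 ≤ l.count k := List.one_le_count_iff.mpr hmem
      have h2 : ¬ (1 < ((l.count k : Int))) := by simpa using hfalse
      have : l.count k = 1 := by omega
      simp [this])
  simp only [Function.comp_def] at *
  rw [zero_add]
  exact this.trans rfl

-- ===== VERDICT (by name: the statement is the Claim_ definition above) =====
theorem f_spec : Claim_equal_f := by
  intro number _
  show f number = f_alt number
  unfold f f_alt
  simp only [pv_A_loop, pv_B_eq]
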